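-- pv_equiv track=rewrite | github.com/rasmusfreund/bioinf-prog-course | programming_projects/sandbox/quration/project2_solution.py | get_unmasked_sequence
-- ===== SOURCE A (Python) =====
-- def get_unmasked_sequence(sequence):
--
--     result = []
--     sublist = []
--     for b in sequence:
--         if b == 'N':
--             if sublist:
--                 result.append(''.join(sublist))
--                 sublist = []
--         else:
--             sublist.append(b)
--     if sublist:
--         result.append(''.join(sublist))
--     return result
-- ===== SOURCE B (Python) =====
-- def get_unmasked_sequence(sequence):
--     # Two staged passes: first compute the index positions of the mask letter,
--     # then cut the sequence between consecutive cut points by slicing.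
--     seq = list(sequence)
--     n = len(seq)
--     cuts = [i for i, b in enumerate(seq) if b == 'N']
--     starts = [0] + [c + 1 for c in cuts]
--     ends = cuts + [n]
--     return [''.join(seq[s:e]) for s, e in zip(starts, ends) if e > s]
-- ===== Notes on version B (the rewrite author's own statement) =====
-- stated objective: alternative
-- what changed: Instead of A's single streaming pass with an accumulate-and-flush buffer, B first computes the list of mask-letter index positions, derives the start/end cut points from it, and then extracts each non-empty segment by index slicing (a staged index-arithmetic algorithm rather than a streaming one).
import Mathlib
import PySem

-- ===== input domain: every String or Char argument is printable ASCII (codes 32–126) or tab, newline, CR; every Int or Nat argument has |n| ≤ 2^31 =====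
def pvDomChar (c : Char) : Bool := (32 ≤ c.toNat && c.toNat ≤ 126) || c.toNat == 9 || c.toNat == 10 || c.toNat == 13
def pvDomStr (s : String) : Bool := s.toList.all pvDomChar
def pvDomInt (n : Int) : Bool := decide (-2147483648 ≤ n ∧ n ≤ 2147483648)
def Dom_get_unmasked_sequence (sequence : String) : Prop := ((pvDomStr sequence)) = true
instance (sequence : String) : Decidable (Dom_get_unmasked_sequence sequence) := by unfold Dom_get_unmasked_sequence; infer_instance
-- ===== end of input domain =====

-- B replaces A's streaming accumulate-and-flush pass by a staged algorithm: collect the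
-- mask-letter index positions, derive start/end cut points, and slice out non-empty segments
-- (alternative decomposition; same cost).


-- ===== PORT A =====
-- one loop step of A: flush the pending sublist on 'N', else extend it
def pvStepA (st : List String × List Char) (b : Char) : List String × List Char :=
  if b = 'N' then
    (if st.2 ≠ [] then (st.1 ++ [String.mk st.2], ([] : List Char)) else st)
  else
    (st.1, st.2 ++ [b])

-- the trailing 'if sublist: result.append(...)'
def pvFinishA (st : List String × List Char) : List String :=
  if st.2 ≠ [] then st.1 ++ [String.mk st.2] else st.1

def get_unmasked_sequence (sequence : String) : List String :=
  pvFinishA (sequence.toList.foldl pvStepA ([], []))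

-- ===== PORT B =====
-- cuts = [i for i, b in enumerate(seq) if b == 'N']
def pvNIdx (seq : List Char) : List Int :=
  (PySem.List.enumerate seq 0).filterMap (fun ib => if ib.2 = 'N' then some ib.1 else none)

def get_unmasked_sequence_alt (sequence : String) : List String :=
  let seq := sequence.toList
  let n : Int := seq.length
  let cuts := pvNIdx seq
  let starts := (0 : Int) :: cuts.map (· + 1)
  let ends := cuts ++ [n]
  (starts.zip ends).filterMap (fun se =>
    if se.2 > se.1 then some (String.mk (PySem.List.slice seq (some se.1) (some se.2))) else none)

-- ===== PRECONDITION & SPEC =====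
def Spec_get_unmasked_sequence (sequence : String) (out : List String) : Prop := out = get_unmasked_sequence_alt sequence
instance (sequence : String) (out : List String) : Decidable (Spec_get_unmasked_sequence sequence out) := by unfold Spec_get_unmasked_sequence; infer_instance

-- ===== CLAIM (what is proved, stated in full; the proofs are below) =====
def Claim_equal_get_unmasked_sequence : Prop := ∀ (sequence : String), Dom_get_unmasked_sequence sequence → Spec_get_unmasked_sequence sequence (get_unmasked_sequence sequence)

-- ===== LEMMAS AND PROOFS =====

-- reference function for A: pvF sub cs = segments produced from cs with pending run sub
def pvF : List Char → List Char → List String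
  | sub, [] => if sub.isEmpty then [] else [String.mk sub]
  | sub, c :: cs =>
    if c = 'N' then (if sub.isEmpty then pvF [] cs else String.mk sub :: pvF [] cs)
    else pvF (sub ++ [c]) cs

lemma pvFoldA_eq (cs : List Char) : ∀ (res : List String) (sub : List Char),
    pvFinishA (cs.foldl pvStepA (res, sub)) = res ++ pvF sub cs := by
  induction cs with
  | nil =>
    intro res sub
    cases sub <;> simp [pvFinishA, pvF]
  | cons c cs ih =>
    intro res sub
    by_cases hc : c = 'N'
    · cases sub with
      | nil => simp [pvStepA, hc, pvF, ih]
      | cons s ss => simp [pvStepA, hc, pvF, ih]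
    · simp [pvStepA, hc, pvF, ih]

lemma pvExtend : ∀ (g sub cs : List Char), sub ≠ [] → (∀ d ∈ g, d ≠ 'N') →
    pvF sub (g ++ cs) = pvF (sub ++ g) cs := by
  intro g
  induction g with
  | nil => intro sub cs _ _; simp
  | cons d g ih =>
    intro sub cs hsub h
    have hd : d ≠ 'N' := h d (by simp)
    simp only [List.cons_append, pvF, if_neg hd]
    rw [ih (sub ++ [d]) cs (by simp) (fun x hx => h x (by simp [hx]))]
    simp

-- Nat-valued mask positions, recursively
def pvCuts : List Char → List Nat
  | [] => []
  | c :: cs => if c = 'N' then 0 :: (pvCuts cs).map (· + 1) else (pvCuts cs).map (· + 1)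

-- segment selector on Nat cut pairs
def pvSel (l : List Char) (se : Nat × Nat) : Option String :=
  if se.1 < se.2 then some (String.mk ((l.drop se.1).take (se.2 - se.1))) else none

-- Nat-level reference for B
def pvG (cs : List Char) : List String :=
  ((0 :: (pvCuts cs).map (· + 1)).zip (pvCuts cs ++ [cs.length])).filterMap (pvSel cs)

lemma pvNIdx_eq (cs : List Char) : ∀ s : Nat,
    (PySem.List.enumerate cs (s : Int)).filterMap (fun ib => if ib.2 = 'N' then some ib.1 else none)
      = (pvCuts cs).map (fun k => ((s + k : Nat) : Int)) := by
  induction cs with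
  | nil => intro s; simp [PySem.List.enumerate_nil, pvCuts]
  | cons c cs ih =>
    intro s
    rw [PySem.List.enumerate_cons]
    by_cases hc : c = 'N'
    · have h1 : ((s : Int) + 1) = ((s + 1 : Nat) : Int) := by push_cast; ring
      simp only [List.filterMap_cons, hc, if_true, pvCuts, h1, ih (s + 1),
        List.map_cons, List.map_map]
      refine List.cons_eq_cons.mpr ⟨by push_cast; ring, ?_⟩
      apply List.map_congr_left; intro k _; simp only [Function.comp_apply]; push_cast; ring
    · have h1 : ((s : Int) + 1) = ((s + 1 : Nat) : Int) := by push_cast; ring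
      simp only [List.filterMap_cons, if_neg hc, pvCuts, h1, ih (s + 1), List.map_map]
      apply List.map_congr_left; intro k _; simp only [Function.comp_apply]; push_cast; ring

-- the B port computes pvG
lemma pvAlt_eq_pvG (s : String) : get_unmasked_sequence_alt s = pvG s.toList := by
  have hcuts := pvNIdx_eq s.toList 0
  simp only [Nat.cast_zero, Nat.zero_add] at hcuts
  simp only [get_unmasked_sequence_alt, pvNIdx, pvG]
  rw [hcuts]
  have hA : ((pvCuts s.toList).map (fun k : Nat => (k : Int))).map (· + 1)
      = ((pvCuts s.toList).map (· + 1)).map (fun k : Nat => (k : Int)) := by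
    simp only [List.map_map]
    apply List.map_congr_left; intro k _
    simp only [Function.comp_apply]; push_cast; ring
  have hB : ((pvCuts s.toList).map (fun k : Nat => (k : Int))) ++ [((s.toList.length : Nat) : Int)]
      = (pvCuts s.toList ++ [s.toList.length]).map (fun k : Nat => (k : Int)) := by
    simp
  rw [hA, hB]
  have hz : ((0 : Int) :: ((pvCuts s.toList).map (· + 1)).map (fun k : Nat => (k : Int)))
      = ((0 : Nat) :: (pvCuts s.toList).map (· + 1)).map (fun k : Nat => (k : Int)) := by
    simp
  rw [hz, List.zip_map, List.filterMap_map]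
  apply List.filterMap_congr
  intro se _
  rcases se with ⟨a, b⟩
  simp only [Function.comp_apply, Prod.map_apply, pvSel]
  by_cases h : a < b
  · rw [if_pos (by exact_mod_cast h), if_pos h, PySem.List.slice_natCast]
  · rw [if_neg (by exact_mod_cast h), if_neg h]

-- shift lemma: slicing after a prefix of length m
lemma pvShift (pfx t : List Char) (S E : List Nat) :
    ((S.map (· + pfx.length)).zip (E.map (· + pfx.length))).filterMap (pvSel (pfx ++ t))
      = (S.zip E).filterMap (pvSel t) := by
  rw [List.zip_map, List.filterMap_map]
  apply List.filterMap_congr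
  intro se _
  rcases se with ⟨a, b⟩
  simp only [Function.comp, Prod.map, pvSel]
  by_cases h : a < b
  · rw [if_pos (by omega), if_pos h]
    have hd : (pfx ++ t).drop (a + pfx.length) = t.drop a := by
      rw [Nat.add_comm, List.drop_append]
      have h1 : pfx.drop (pfx.length + a) = [] := List.drop_eq_nil_of_le (by omega)
      have h2 : pfx.length + a - pfx.length = a := by omega
      rw [h1, h2, List.nil_append]
    have h3 : b + pfx.length - (a + pfx.length) = b - a := by omega
    rw [hd, h3]
  · rw [if_neg (by omega), if_neg h]

lemma pvG_N (rest : List Char) : pvG ('N' :: rest) = pvG rest := by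
  unfold pvG
  simp only [pvCuts, if_true, List.map_cons, List.length_cons, List.cons_append]
  rw [List.zip_cons_cons, List.filterMap_cons]
  rw [show pvSel ('N' :: rest) (0, 0) = none from by simp [pvSel]]
  calc List.filterMap (pvSel ('N' :: rest))
        (((0 + 1) :: ((pvCuts rest).map (· + 1)).map (· + 1)).zip
          ((pvCuts rest).map (· + 1) ++ [rest.length + 1]))
      = (((0 :: (pvCuts rest).map (· + 1)).map (· + 1)).zip
          (((pvCuts rest) ++ [rest.length]).map (· + 1))).filterMap
          (pvSel (['N'] ++ rest)) := by
        simp only [List.map_cons, List.map_append, List.map_nil, List.singleton_append]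
    _ = ((0 :: (pvCuts rest).map (· + 1)).zip ((pvCuts rest) ++ [rest.length])).filterMap
          (pvSel rest) := by
        have h := pvShift ['N'] rest (0 :: (pvCuts rest).map (· + 1)) ((pvCuts rest) ++ [rest.length])
        simpa using h
    _ = pvG rest := rfl

lemma pvDropHead {p : Char → Bool} : ∀ (l : List Char) (d : Char) (r : List Char),
    l.dropWhile p = d :: r → p d = false := by
  intro l
  induction l with
  | nil => intro d r h; simp at h
  | cons x xs ih =>
    intro d r h
    by_cases hx : p x
    · rw [List.dropWhile_cons_of_pos hx] at h; exact ih d r h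
    · rw [List.dropWhile_cons_of_neg hx] at h
      cases h
      simpa using hx

lemma pvCuts_nfree : ∀ (p : List Char), (∀ d ∈ p, d ≠ 'N') → pvCuts p = [] := by
  intro p
  induction p with
  | nil => intro _; rfl
  | cons c p ih =>
    intro h
    simp only [pvCuts, if_neg (h c (by simp)), ih (fun x hx => h x (by simp [hx]))]
    rfl

lemma pvCuts_split : ∀ (p t : List Char), (∀ d ∈ p, d ≠ 'N') →
    pvCuts (p ++ 'N' :: t) = p.length :: (pvCuts t).map (· + (p.length + 1)) := by
  intro p
  induction p with
  | nil =>
    intro t _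
    simp only [List.nil_append, pvCuts, if_true, List.length_nil, Nat.zero_add]
  | cons c p ih =>
    intro t h
    simp only [List.cons_append, pvCuts, if_neg (h c (by simp)),
      ih t (fun x hx => h x (by simp [hx])), List.map_cons, List.map_map, List.length_cons]
    refine List.cons_eq_cons.mpr ⟨rfl, ?_⟩
    apply List.map_congr_left; intro k _; simp only [Function.comp_apply]; omega

-- main lemma: A's reference equals B's reference
lemma pvMain : ∀ (n : Nat) (cs : List Char), cs.length ≤ n → pvF [] cs = pvG cs := by
  intro n
  induction n with
  | zero =>
    intro cs h
    have : cs = [] := List.length_eq_zero_iff.mp (Nat.le_zero.mp h)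
    subst this; simp [pvF, pvG, pvCuts, pvSel]
  | succ n ih =>
    intro cs hlen
    match cs with
    | [] => simp [pvF, pvG, pvCuts, pvSel]
    | c :: rest =>
      by_cases hc : c = 'N'
      · subst hc
        have h1 : pvF [] ('N' :: rest) = pvF [] rest := by simp [pvF]
        rw [h1, pvG_N]
        exact ih rest (by simpa using Nat.le_of_succ_le_succ hlen)
      · -- split rest at the first 'N'
        set g := rest.takeWhile (fun d => !(d == 'N')) with hgdef
        set r := rest.dropWhile (fun d => !(d == 'N')) with hrdef
        have hsplit : rest = g ++ r := (List.takeWhile_append_dropWhile).symm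
        have hg : ∀ d ∈ g, d ≠ 'N' := by
          intro d hd
          have := List.mem_takeWhile_imp hd
          simpa using this
        have hp : ∀ d ∈ c :: g, d ≠ 'N' := by
          intro d hd
          rcases List.mem_cons.mp hd with h | h
          · subst h; exact hc
          · exact hg d h
        have h1 : pvF [] (c :: rest) = pvF [c] rest := by simp [pvF, hc]
        rw [h1]
        conv_lhs => rw [hsplit]
        rw [pvExtend g [c] r (by simp) hg]
        match hr : r with
        | [] =>
          -- no 'N' anywhere: one segment
          have hcs : c :: rest = c :: g := by rw [hsplit]; simp
          rw [hcs]
          simp only [pvF]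
          rw [if_neg (by simp)]
          unfold pvG
          rw [pvCuts_nfree (c :: g) hp]
          simp [pvSel]
        | d :: r2 =>
          have hd : d = 'N' := by
            have := pvDropHead rest d r2 hrdef.symm
            simpa using this
          subst hd
          have h2 : pvF ([c] ++ g) ('N' :: r2) = String.mk (c :: g) :: pvF [] r2 := by
            simp [pvF]
          rw [h2]
          have hr2 : r2.length ≤ n := by
            have : rest.length = g.length + ('N' :: r2).length := by
              rw [hsplit]; simp
            simp only [List.length_cons] at this hlen
            omega
          rw [ih r2 hr2]
          -- now the B side
          have hcs : c :: rest = (c :: g) ++ 'N' :: r2 := by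
            rw [hsplit]; simp
          rw [hcs]
          set p := c :: g with hpdef
          unfold pvG
          rw [pvCuts_split p r2 hp]
          simp only [List.map_cons, List.length_append, List.length_cons, List.map_map,
            List.cons_append]
          rw [List.zip_cons_cons, List.filterMap_cons]
          have hsel1 : pvSel (p ++ 'N' :: r2) (0, p.length) = some (String.mk p) := by
            have hkpos : 0 < p.length := by rw [hpdef]; simp
            simp only [pvSel, if_pos hkpos, List.drop_zero, Nat.sub_zero]
            rw [List.take_append_of_le_length (by omega), List.take_length]
          rw [hsel1]
          congr 1
          symm
          -- remaining pairs are the shifted pairs of r2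
          have hst : (p.length + 1) :: (pvCuts r2).map ((fun x => x + 1) ∘ fun x => x + (p.length + 1))
              = ((0 :: (pvCuts r2).map (· + 1)).map (· + (p.length + 1))) := by
            simp only [List.map_cons, List.map_map, Nat.zero_add]
            refine List.cons_eq_cons.mpr ⟨rfl, ?_⟩
            apply List.map_congr_left; intro x _; simp only [Function.comp_apply]; omega
          have hen : (pvCuts r2).map (· + (p.length + 1)) ++ [p.length + (r2.length + 1)]
              = ((pvCuts r2 ++ [r2.length]).map (· + (p.length + 1))) := by
            simp only [List.map_append, List.map_cons, List.map_nil]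
            congr 2
            omega
          have hpfx : (p ++ ['N']).length = p.length + 1 := by simp
          calc (((p.length + 1) :: (pvCuts r2).map ((fun x => x + 1) ∘ fun x => x + (p.length + 1))).zip
                  ((pvCuts r2).map (· + (p.length + 1)) ++ [p.length + (r2.length + 1)])).filterMap
                  (pvSel (p ++ 'N' :: r2))
              = (((0 :: (pvCuts r2).map (· + 1)).map (· + (p.length + 1))).zip
                  ((pvCuts r2 ++ [r2.length]).map (· + (p.length + 1)))).filterMap
                  (pvSel ((p ++ ['N']) ++ r2)) := by
                rw [hst, hen]; congr 1; simp
            _ = ((0 :: (pvCuts r2).map (· + 1)).zip (pvCuts r2 ++ [r2.length])).filterMap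
                  (pvSel r2) := by
                rw [← hpfx]; exact pvShift (p ++ ['N']) r2 _ _
            _ = pvG r2 := rfl

-- ===== VERDICT (by name: the statement is the Claim_ definition above) =====
theorem get_unmasked_sequence_spec : Claim_equal_get_unmasked_sequence := by
  intro s _
  show get_unmasked_sequence s = get_unmasked_sequence_alt s
  unfold get_unmasked_sequence
  rw [pvFoldA_eq s.toList [] [], pvAlt_eq_pvG]
  simpa using pvMain s.toList.length s.toList le_rfl
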